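-- pv_equiv track=rewrite | github.com/CorwinCheung/Transformers_for_Modeling_Decision_Sequences | experiments/ltd/pattern.py | introduce_pattern
-- ===== SOURCE A (Python) =====
-- def introduce_pattern(data, pattern_length):
--     """
--     Introduces a pattern by replacing every nth character with 'R',
--     skipping newline characters.
--
--     Args:
--         data (str): String representing the behavior data
--         pattern_length (int): Every nth character to replace with 'R'
--
--     Returns:
--         str: Modified data with introduced pattern
--     """
--     modified_data = list(data)
--     counter = 0  # Count actual characters (excluding newlines)
--
--     for i in range(len(modified_data)):
--         if modified_data[i] != '\n':  # Skip counting newlines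
--             counter += 1
--             if counter % pattern_length == 0:  # Every nth actual character
--                 modified_data[i] = 'R'
--
--     return ''.join(modified_data)
-- ===== SOURCE B (Python) =====
-- def introduce_pattern(data, pattern_length):
--     # filter -> index-based replace -> merge, instead of A's fused counting pass
--     chars = ['R' if (j + 1) % pattern_length == 0 else c
--              for j, c in enumerate(c for c in data if c != '\n')]
--     it = iter(chars)
--     return ''.join('\n' if c == '\n' else next(it) for c in data)
-- ===== Notes on version B (the rewrite author's own statement) =====
-- stated objective: alternative
-- what changed: A's single fused pass that mutates the list while counting non-newline characters is replaced by filter (drop newlines) -> modulo-indexed replacement on the filtered list -> merge back with the newlines.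
import Mathlib
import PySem

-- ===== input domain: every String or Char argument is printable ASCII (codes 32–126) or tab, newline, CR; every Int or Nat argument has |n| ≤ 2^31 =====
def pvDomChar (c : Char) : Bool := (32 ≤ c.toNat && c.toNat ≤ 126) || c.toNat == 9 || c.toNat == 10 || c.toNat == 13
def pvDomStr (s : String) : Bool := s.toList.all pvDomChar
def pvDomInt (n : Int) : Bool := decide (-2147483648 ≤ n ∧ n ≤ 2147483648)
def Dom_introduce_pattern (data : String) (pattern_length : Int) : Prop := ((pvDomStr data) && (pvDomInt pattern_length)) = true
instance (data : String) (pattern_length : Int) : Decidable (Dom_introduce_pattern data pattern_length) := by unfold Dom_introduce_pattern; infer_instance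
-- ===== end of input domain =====

-- B replaces A's fused counting-and-mutating pass by filter → indexed replace → merge (alternative decomposition, same cost).

-- ===== PORT A =====
-- A's for-loop over the characters: each step reads the character at the current
-- position, bumps the non-newline counter, and possibly overwrites it with 'R'.
def introduce_pattern_go (pattern_length : Int) : Int → List Char → List Char
  | _, [] => []
  | counter, c :: rest =>
    if c ≠ '\n' then
      let counter' := counter + 1
      (if PySem.Int.mod counter' pattern_length == 0 then 'R' else c)
        :: introduce_pattern_go pattern_length counter' rest
    else
      c :: introduce_pattern_go pattern_length counter rest

def introduce_pattern (data : String) (pattern_length : Int) : String :=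
  String.mk (introduce_pattern_go pattern_length 0 data.toList)

-- ===== PORT B =====
-- merge: for each original character, pass '\n' through, otherwise consume the
-- next element of the replaced pool (Python: next(it); pool never runs dry).
def introduce_pattern_merge : List Char → List Char → List Char
  | [], _ => []
  | c :: rest, pool =>
    if c == '\n' then '\n' :: introduce_pattern_merge rest pool
    else
      match pool with
      | p :: ps => p :: introduce_pattern_merge rest ps
      | [] => []  -- next(it) on an exhausted iterator; unreachable (pool has one entry per non-newline char)

def introduce_pattern_alt (data : String) (pattern_length : Int) : String :=
  let chars :=
    (PySem.List.enumerate (data.toList.filter (fun c => c ≠ '\n')) 0).map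
      (fun jc => if PySem.Int.mod (jc.1 + 1) pattern_length == 0 then 'R' else jc.2)
  String.mk (introduce_pattern_merge data.toList chars)

-- ===== PRECONDITION & SPEC =====
-- Pre_ excludes exactly the inputs where Python A raises ZeroDivisionError:
-- pattern_length == 0 while data contains a non-newline character (B raises there too).
def Pre_introduce_pattern (data : String) (pattern_length : Int) : Prop :=
  pattern_length ≠ 0 ∨ data.toList.all (fun c => c == '\n') = true
instance (data : String) (pattern_length : Int) : Decidable (Pre_introduce_pattern data pattern_length) := by unfold Pre_introduce_pattern; infer_instance

def pvWitness_introduce_pattern : String × Int := ("ab\ncd", 2)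

def Spec_introduce_pattern (data : String) (pattern_length : Int) (out : String) : Prop := out = introduce_pattern_alt data pattern_length
instance (data : String) (pattern_length : Int) (out : String) : Decidable (Spec_introduce_pattern data pattern_length out) := by unfold Spec_introduce_pattern; infer_instance

-- ===== CLAIM (what is proved, stated in full; the proofs are below) =====
def Claim_equal_introduce_pattern : Prop := ∀ (data : String) (pattern_length : Int), Dom_introduce_pattern data pattern_length → Pre_introduce_pattern data pattern_length → Spec_introduce_pattern data pattern_length (introduce_pattern data pattern_length)

-- ===== LEMMAS AND PROOFS =====

-- B's replaced pool, written with an explicit starting counter k (so the merge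
-- invariant can be stated for every suffix of the data).
def pvReplFrom (pattern_length : Int) : Int → List Char → List Char
  | _, [] => []
  | k, c :: cs =>
    (if PySem.Int.mod (k + 1) pattern_length == 0 then 'R' else c)
      :: pvReplFrom pattern_length (k + 1) cs

theorem pvReplFrom_eq_enumerate_map (pl : Int) (k : Int) (cs : List Char) :
    pvReplFrom pl k cs
      = (PySem.List.enumerate cs k).map
          (fun jc => if PySem.Int.mod (jc.1 + 1) pl == 0 then 'R' else jc.2) := by
  induction cs generalizing k with
  | nil => simp [pvReplFrom, PySem.List.enumerate_nil]
  | cons c cs ih => simp [pvReplFrom, PySem.List.enumerate_cons, ih]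

theorem pv_go_eq_merge_repl (pl : Int) (l : List Char) (k : Int) :
    introduce_pattern_go pl k l
      = introduce_pattern_merge l (pvReplFrom pl k (l.filter (fun c => c ≠ '\n'))) := by
  induction l generalizing k with
  | nil => simp [introduce_pattern_go, introduce_pattern_merge]
  | cons c rest ih =>
    by_cases h : c = '\n'
    · subst h
      simp [introduce_pattern_go, introduce_pattern_merge, ih]
    · simp [introduce_pattern_go, introduce_pattern_merge, h, pvReplFrom, ih]

-- ===== VERDICT (by name: the statement is the Claim_ definition above) =====
theorem introduce_pattern_spec : Claim_equal_introduce_pattern := by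
  intro data pl _ _
  unfold Spec_introduce_pattern introduce_pattern introduce_pattern_alt
  rw [pv_go_eq_merge_repl, pvReplFrom_eq_enumerate_map]
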